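-- pv_equiv track=rewrite | github.com/Negadiay/AOIS | LR7/main.py | _compare_binary_words
-- ===== SOURCE A (Python) =====
-- def _compare_binary_words(word_a, word_b):
--     is_greater = False
--     is_lesser = False
--     for i in range(len(word_a)):
--         bit_a = word_a[i]
--         bit_b = word_b[i]
--
--         is_greater_current = is_greater or (bit_a and not bit_b and not is_lesser)
--         is_lesser_current = is_lesser or (not bit_a and bit_b and not is_greater)
--
--         is_greater, is_lesser = is_greater_current, is_lesser_current
--
--     return is_greater, is_lesser
-- ===== SOURCE B (Python) =====
-- def _compare_binary_words(word_a, word_b):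
--     for i in range(len(word_a)):
--         if word_a[i] and not word_b[i]:
--             return True, False
--         if not word_a[i] and word_b[i]:
--             return False, True
--     return False, False
-- ===== Notes on version B (the rewrite author's own statement) =====
-- stated objective: simpler
-- what changed: Replaces the full-scan latching two-boolean accumulator with an early-returning scan that stops at the first differing bit (fewer per-iteration boolean operations, and early exit).
import Mathlib
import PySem

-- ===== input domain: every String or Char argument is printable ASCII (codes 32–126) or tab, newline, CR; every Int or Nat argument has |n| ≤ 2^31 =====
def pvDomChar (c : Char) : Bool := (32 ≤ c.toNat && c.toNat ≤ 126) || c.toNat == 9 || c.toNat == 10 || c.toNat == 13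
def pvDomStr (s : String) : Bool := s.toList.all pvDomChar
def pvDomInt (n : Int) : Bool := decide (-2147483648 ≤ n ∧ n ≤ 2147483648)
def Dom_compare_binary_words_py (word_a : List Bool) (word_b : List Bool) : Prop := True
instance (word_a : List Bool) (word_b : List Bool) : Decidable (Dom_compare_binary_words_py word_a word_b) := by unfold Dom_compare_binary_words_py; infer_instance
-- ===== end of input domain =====

-- B replaces A's latching two-boolean accumulator over the whole word with an
-- early-returning scan that stops at the first differing bit (objective: simpler).

-- ===== PORT A =====
-- loop body of A (one iteration of the latch update)
def pvStepA (word_a : List Bool) (word_b : List Bool) (st : Bool × Bool) (i : Int) : Bool × Bool :=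
  let bit_a := PySem.List.pyGetD word_a i false
  let bit_b := PySem.List.pyGetD word_b i false
  (st.1 || (bit_a && !bit_b && !st.2), st.2 || (!bit_a && bit_b && !st.1))

def compare_binary_words_py (word_a : List Bool) (word_b : List Bool) : Bool × Bool :=
  (PySem.List.pyRange 0 (word_a.length : Int) 1).foldl (pvStepA word_a word_b) (false, false)

-- ===== PORT B =====
-- B's for-loop with early return, as recursion on the index
def pvScanB (word_a : List Bool) (word_b : List Bool) (i : Nat) : Bool × Bool :=
  if i < word_a.length then
    if PySem.List.pyGetD word_a (i : Int) false && !(PySem.List.pyGetD word_b (i : Int) false) then (true, false)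
    else if !(PySem.List.pyGetD word_a (i : Int) false) && PySem.List.pyGetD word_b (i : Int) false then (false, true)
    else pvScanB word_a word_b (i + 1)
  else (false, false)
termination_by word_a.length - i

def compare_binary_words_py_alt (word_a : List Bool) (word_b : List Bool) : Bool × Bool :=
  pvScanB word_a word_b 0

-- ===== PRECONDITION & SPEC =====
-- Python A raises IndexError when word_b is shorter than word_a (word_b[i] out of range).
def Pre_compare_binary_words_py (word_a : List Bool) (word_b : List Bool) : Prop :=
  word_a.length ≤ word_b.length
instance (word_a : List Bool) (word_b : List Bool) : Decidable (Pre_compare_binary_words_py word_a word_b) := by unfold Pre_compare_binary_words_py; infer_instance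

def pvWitness_compare_binary_words_py : List Bool × List Bool := ([true, false], [true, true])

def Spec_compare_binary_words_py (word_a : List Bool) (word_b : List Bool) (out : Bool × Bool) : Prop := out = compare_binary_words_py_alt word_a word_b
instance (word_a : List Bool) (word_b : List Bool) (out : Bool × Bool) : Decidable (Spec_compare_binary_words_py word_a word_b out) := by unfold Spec_compare_binary_words_py; infer_instance

-- ===== CLAIM (what is proved, stated in full; the proofs are below) =====
def Claim_equal_compare_binary_words_py : Prop := ∀ (word_a : List Bool) (word_b : List Bool), Dom_compare_binary_words_py word_a word_b → Pre_compare_binary_words_py word_a word_b → Spec_compare_binary_words_py word_a word_b (compare_binary_words_py word_a word_b)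

-- ===== LEMMAS AND PROOFS =====

-- the latched states (true,false) and (false,true) are absorbing for A's loop body
lemma pvStepA_absorb_gt (a b : List Bool) (l : List Int) :
    l.foldl (pvStepA a b) (true, false) = (true, false) := by
  induction l with
  | nil => rfl
  | cons i t ih => simpa [pvStepA] using ih

lemma pvStepA_absorb_lt (a b : List Bool) (l : List Int) :
    l.foldl (pvStepA a b) (false, true) = (false, true) := by
  induction l with
  | nil => rfl
  | cons i t ih => simpa [pvStepA] using ih

-- A's loop from index i onward, started in the neutral state, is B's scan from i
lemma pvLoop_eq_scan (a b : List Bool) (i : Nat) :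
    (PySem.List.pyRange (i : Int) (a.length : Int) 1).foldl (pvStepA a b) (false, false)
      = pvScanB a b i := by
  by_cases h : i < a.length
  · have hc : (i : Int) < (a.length : Int) := by exact_mod_cast h
    rw [PySem.List.pyRange_one_cons hc]
    have hsucc : (i : Int) + 1 = ((i + 1 : Nat) : Int) := by push_cast; ring
    rw [List.foldl_cons, hsucc]
    rw [pvScanB]
    simp only [h, if_true]
    cases ha : PySem.List.pyGetD a (i : Int) false <;>
      cases hb : PySem.List.pyGetD b (i : Int) false <;>
        simp [pvStepA, ha, hb, pvStepA_absorb_gt, pvStepA_absorb_lt] <;>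
          (rw [hsucc]; exact pvLoop_eq_scan a b (i + 1))
  · have : (a.length : Int) - (i : Int) ≤ 0 := by
      omega
    rw [pvScanB]
    simp only [h, if_false]
    have : PySem.List.pyRange (i : Int) (a.length : Int) 1 = [] := by
      rw [PySem.List.pyRange_one]
      simp [Int.toNat_of_nonpos this]
    rw [this]; rfl
termination_by a.length - i

-- ===== VERDICT (by name: the statement is the Claim_ definition above) =====
theorem compare_binary_words_py_spec : Claim_equal_compare_binary_words_py := by
  intro a b _ _
  unfold Spec_compare_binary_words_py compare_binary_words_py compare_binary_words_py_alt
  simpa using pvLoop_eq_scan a b 0
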